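-- pv_equiv track=rewrite | github.com/kuznetsovvj/education | algorithms/codeforces/1714d.py | check_continiously
-- ===== SOURCE A (Python) =====
-- def check_continiously(target, patterns, prev_start, prev_fin):
--     # prev_start - номер в строке, с которого мы начали последний шаблон
--     # prev_fin - номер в строке, на котором закончился последний шаблон
--     max_pos = prev_fin # по умолчанию - максимальная позиция - это конец предыдущего шаблона, меньше него нет смысла пробовать
--     num_pattern = -1 # номер текущего максимального паттерна
--     st_pos = -1 # стартовая позиция текущего паттерна
--     for pos in range(prev_start + 1, prev_fin + 2):
--         # надо перебрать позиции от prev_start + 1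
--         # и дойти до prev_fin + 1 - паттерны могут идти "в стык", без наложения
--         for idx, pattern in enumerate(patterns):
--             if target.startswith(pattern, pos): # ищем вхождение паттерна с позиции pos
--                 if max_pos < len(pattern) + pos - 1: # паттерн начинается на символе 4 и длиной 2 - значит позиция окончания 5, верно
--                     max_pos = len(pattern) + pos - 1
--                     st_pos = pos # стартовая позиция паттерна c нуля!
--                     num_pattern = idx + 1 # номер шаблона в коллекции шаблонов
--     if max_pos == prev_fin: # не нашли шаблон длиннее, чем конец прошлого - тупик
--         return (False, None)
--     return (True, (num_pattern, st_pos + 1)) # если мы делаем позицию для ответа - то строка нумерация с 1, +1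
-- ===== SOURCE B (Python) =====
-- def check_continiously(target, patterns, prev_start, prev_fin):
--     # Pattern-major scan: for each pattern take its rightmost match in the
--     # window (first hit scanning positions downward, then break), and keep the
--     # lexicographic maximum of (end, -pos, -rank), which reproduces A's
--     # "first strict improvement" tie-breaking.
--     best = None  # (end, -pos, -rank)
--     for rank, pat in enumerate(patterns, 1):
--         for pos in range(prev_fin + 1, prev_start, -1):
--             if target.startswith(pat, pos):
--                 cand = (pos + len(pat) - 1, -pos, -rank)
--                 if best is None or cand > best:
--                     best = cand
--                 break
--     if best is None or best[0] <= prev_fin: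
--         return (False, None)
--     return (True, (-best[2], -best[1] + 1))
-- ===== Notes on version B (the rewrite author's own statement) =====
-- stated objective: alternative
-- what changed: Replaced the position-major double scan that mutates a best-so-far triple with a pattern-major scan: each pattern's rightmost match in the window is found once (descending scan with early break) and the answer is the lexicographic maximum of the per-pattern (end,-pos,-rank) candidates.
import Mathlib
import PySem

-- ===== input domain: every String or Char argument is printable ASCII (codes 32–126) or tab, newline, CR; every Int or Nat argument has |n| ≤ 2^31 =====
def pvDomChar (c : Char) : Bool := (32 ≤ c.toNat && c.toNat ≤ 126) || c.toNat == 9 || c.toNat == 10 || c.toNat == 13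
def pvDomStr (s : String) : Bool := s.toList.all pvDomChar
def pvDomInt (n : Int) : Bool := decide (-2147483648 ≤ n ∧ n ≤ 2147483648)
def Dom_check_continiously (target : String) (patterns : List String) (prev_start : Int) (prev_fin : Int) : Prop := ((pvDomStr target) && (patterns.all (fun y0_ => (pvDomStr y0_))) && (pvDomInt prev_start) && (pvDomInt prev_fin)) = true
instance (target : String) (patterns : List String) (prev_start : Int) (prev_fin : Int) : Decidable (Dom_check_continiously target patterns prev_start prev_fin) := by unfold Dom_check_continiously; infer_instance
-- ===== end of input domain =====

-- B replaces A's position-major double scan by a pattern-major scan (rightmost match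
-- per pattern, then a lexicographic-maximum reduction); same results, alternative structure.

-- Python's str.startswith(p, pos) with an explicit int start (PySem has no start
-- parameter): a negative start is clamped to max(0, len+pos); a start beyond len(s)
-- never matches (even for p = ''); otherwise a prefix test on the suffix. Exact for
-- all int starts. Shared by both ports (it ports the same Python builtin).
def pyStartswithFrom (s : List Char) (p : List Char) (pos : Int) : Bool :=
  let e : Int := if pos < 0 then max 0 ((s.length : Int) + pos) else pos
  if (s.length : Int) < e then false else p.isPrefixOf (s.drop e.toNat)

-- ===== PORT A =====
def check_continiously (target : String) (patterns : List String) (prev_start : Int) (prev_fin : Int) : Bool × (Option (Int × Int)) :=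
  let st := (PySem.List.pyRange (prev_start + 1) (prev_fin + 2) 1).foldl
    (fun (st : Int × Int × Int) pos =>
      (PySem.List.enumerate patterns 0).foldl
        (fun (st : Int × Int × Int) ip =>
          if pyStartswithFrom target.toList ip.2.toList pos then
            if st.1 < PySem.Str.len ip.2 + pos - 1 then
              (PySem.Str.len ip.2 + pos - 1, ip.1 + 1, pos)
            else st
          else st) st)
    (prev_fin, -1, -1)
  if st.1 = prev_fin then (false, none)
  else (true, some (st.2.1, st.2.2 + 1))

-- ===== PORT B =====
-- tuple comparison cand > best on int triples (Python's lexicographic tuple order)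
def tupGt (a b : Int × Int × Int) : Bool :=
  b.1 < a.1 || (a.1 == b.1 && (b.2.1 < a.2.1 || (a.2.1 == b.2.1 && b.2.2 < a.2.2)))

def check_continiously_alt (target : String) (patterns : List String) (prev_start : Int) (prev_fin : Int) : Bool × (Option (Int × Int)) :=
  let best := (PySem.List.enumerate patterns 1).foldl
    (fun (best : Option (Int × Int × Int)) rp =>
      match (PySem.List.pyRange (prev_fin + 1) prev_start (-1)).find?
          (fun pos => pyStartswithFrom target.toList rp.2.toList pos) with
      | none => best
      | some pos =>
        let cand : Int × Int × Int := (pos + PySem.Str.len rp.2 - 1, -pos, -rp.1)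
        match best with
        | none => some cand
        | some b => if tupGt cand b then some cand else best)
    none
  match best with
  | none => (false, none)
  | some b => if b.1 ≤ prev_fin then (false, none) else (true, some (-b.2.2, -b.2.1 + 1))

-- ===== PRECONDITION & SPEC =====
def Spec_check_continiously (target : String) (patterns : List String) (prev_start : Int) (prev_fin : Int) (out : Bool × (Option (Int × Int))) : Prop := out = check_continiously_alt target patterns prev_start prev_fin
instance (target : String) (patterns : List String) (prev_start : Int) (prev_fin : Int) (out : Bool × (Option (Int × Int))) : Decidable (Spec_check_continiously target patterns prev_start prev_fin out) := by unfold Spec_check_continiously; infer_instance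

-- ===== CLAIM (what is proved, stated in full; the proofs are below) =====
def Claim_equal_check_continiously : Prop := ∀ (target : String) (patterns : List String) (prev_start : Int) (prev_fin : Int), Dom_check_continiously target patterns prev_start prev_fin → Spec_check_continiously target patterns prev_start prev_fin (check_continiously target patterns prev_start prev_fin)

-- ===== LEMMAS AND PROOFS =====

-- Candidate triples in A's internal encoding: (end position, pattern number, start position).
def candOf (pos : Int) (ip : Int × String) : Int × Int × Int :=
  (PySem.Str.len ip.2 + pos - 1, ip.1 + 1, pos)

-- all matches, position-major (A's scan order)
def candsA (t : List Char) (pats : List String) (a f : Int) : List (Int × Int × Int) :=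
  (PySem.List.pyRange (a + 1) (f + 2) 1).flatMap (fun pos =>
    (PySem.List.enumerate pats 0).flatMap (fun ip =>
      if pyStartswithFrom t ip.2.toList pos then [candOf pos ip] else []))

-- per-pattern rightmost matches, pattern-major (B's candidates, A-encoding)
def pcand (t : List Char) (a f : Int) (rp : Int × String) : List (Int × Int × Int) :=
  match (PySem.List.pyRange (f + 1) a (-1)).find?
      (fun pos => pyStartswithFrom t rp.2.toList pos) with
  | none => []
  | some pos => [(pos + PySem.Str.len rp.2 - 1, rp.1, pos)]

def candsP (t : List Char) (pats : List String) (a f : Int) : List (Int × Int × Int) :=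
  (PySem.List.enumerate pats 1).flatMap (pcand t a f)

def stepA (s v : Int × Int × Int) : Int × Int × Int := if s.1 < v.1 then v else s

-- "u is a strictly better answer than v": larger end, or same end and earlier in A's scan
def betterB (u v : Int × Int × Int) : Bool :=
  v.1 < u.1 || (u.1 == v.1 && (u.2.2 < v.2.2 || (u.2.2 == v.2.2 && u.2.1 < v.2.1)))

def maxB (s v : Int × Int × Int) : Int × Int × Int := if betterB v s then v else s

def bestOf : List (Int × Int × Int) → Option (Int × Int × Int)
  | [] => none
  | v :: L => some (L.foldl maxB v)

def phi (u : Int × Int × Int) : Int × Int × Int := (u.1, -u.2.2, -u.2.1)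

-- generic folds
theorem foldl_flatMap' {α β γ : Type} (g : α → List β) (F : γ → β → γ) (s : γ) (l : List α) :
    (l.flatMap g).foldl F s = l.foldl (fun s x => (g x).foldl F s) s := by
  induction l generalizing s with
  | nil => rfl
  | cons x l ih => simp [List.flatMap_cons, List.foldl_append, ih]

-- order facts about betterB
theorem betterB_irrefl (u : Int × Int × Int) : betterB u u = false := by
  simp [betterB]

theorem betterB_asymm {u v : Int × Int × Int} (h : betterB u v = true) : betterB v u = false := by
  simp [betterB] at *; omega

theorem betterB_total {u v : Int × Int × Int} (h1 : betterB u v = false) (h2 : betterB v u = false) : u = v := by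
  simp [betterB] at h1 h2
  obtain ⟨u1, u2, u3⟩ := u; obtain ⟨v1, v2, v3⟩ := v
  simp_all; omega

theorem betterB_le_trans {u v w : Int × Int × Int} (h1 : betterB u v = false) (h2 : betterB v w = false) : betterB u w = false := by
  simp [betterB] at *; omega

theorem not_betterB_fst {u v : Int × Int × Int} (h : betterB u v = false) : u.1 ≤ v.1 := by
  simp [betterB] at h; omega

-- A's fold ignores candidates at or below the initial threshold
theorem foldl_stepA_filter_aux (L : List (Int × Int × Int)) (s0 s : Int × Int × Int)
    (hle : s0.1 ≤ s.1) :
    (L.filter (fun v => decide (s0.1 < v.1))).foldl stepA s = L.foldl stepA s := by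
  induction L generalizing s with
  | nil => rfl
  | cons v L ih =>
    by_cases h : s0.1 < v.1
    · simp only [List.filter_cons, decide_eq_true_eq, if_pos h, List.foldl_cons]
      apply ih
      simp only [stepA]
      split <;> omega
    · simp only [List.filter_cons, decide_eq_true_eq, if_neg h, List.foldl_cons]
      have hstep : stepA s v = s := by simp only [stepA]; split <;> [omega; rfl]
      rw [hstep]
      exact ih s hle

theorem foldl_stepA_filter (s : Int × Int × Int) (L : List (Int × Int × Int)) :
    L.foldl stepA s = (L.filter (fun v => decide (s.1 < v.1))).foldl stepA s :=
  (foldl_stepA_filter_aux L s s le_rfl).symm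

-- on a scan whose tie-order agrees with betterB, A's strict-improvement fold is a max fold
theorem foldl_stepA_eq_maxB (s : Int × Int × Int) (L : List (Int × Int × Int))
    (hpw : L.Pairwise (fun u v => u.1 = v.1 → u.2.2 < v.2.2 ∨ (u.2.2 = v.2.2 ∧ u.2.1 < v.2.1)))
    (hs : ∀ v ∈ L, v.1 = s.1 → s.2.2 < v.2.2 ∨ (s.2.2 = v.2.2 ∧ s.2.1 < v.2.1)) :
    L.foldl stepA s = L.foldl maxB s := by
  induction L generalizing s with
  | nil => rfl
  | cons v L ih =>
    rcases List.pairwise_cons.mp hpw with ⟨hhead, htail⟩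
    simp only [List.foldl_cons]
    rcases lt_trichotomy v.1 s.1 with h | h | h
    · have h1 : stepA s v = s := by simp [stepA]; omega
      have h2 : maxB s v = s := by
        have : betterB v s = false := by simp [betterB]; omega
        simp [maxB, this]
      rw [h1, h2]
      exact ih s htail (fun w hw hweq => hs w (List.mem_cons_of_mem _ hw) hweq)
    · have hv := hs v (List.mem_cons_self) h
      have h1 : stepA s v = s := by simp [stepA]; omega
      have h2 : maxB s v = s := by
        have : betterB v s = false := by simp [betterB]; omega
        simp [maxB, this]
      rw [h1, h2]
      exact ih s htail (fun w hw hweq => hs w (List.mem_cons_of_mem _ hw) hweq)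
    · have h1 : stepA s v = v := by simp [stepA]; omega
      have h2 : maxB s v = v := by
        have : betterB v s = true := by simp [betterB]; omega
        simp [maxB, this]
      rw [h1, h2]
      exact ih v htail (fun w hw hweq => hhead w hw hweq.symm)

theorem candsA_pairwise (t : List Char) (pats : List String) (a f : Int) :
    (candsA t pats a f).Pairwise
      (fun u v => u.2.2 < v.2.2 ∨ (u.2.2 = v.2.2 ∧ u.2.1 < v.2.1)) := by
  unfold candsA
  rw [List.pairwise_flatMap]
  constructor
  · intro pos _
    rw [List.pairwise_flatMap]
    constructor
    · intro ip _
      split <;> simp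
    · apply List.Pairwise.imp ?_ (PySem.List.pairwise_lt_enumerate (xs := pats) (s := 0))
      intro ip1 ip2 hlt x hx y hy
      simp only [List.mem_ite_nil_right, List.mem_singleton] at hx hy
      obtain ⟨-, hx⟩ := hx
      obtain ⟨-, hy⟩ := hy
      subst hx; subst hy
      right
      exact ⟨rfl, by simp only [candOf]; omega⟩
  · apply List.Pairwise.imp ?_ (PySem.List.pairwise_lt_pyRange_one (a := a + 1) (b := f + 2))
    intro p q hpq x hx y hy
    simp only [List.mem_flatMap, List.mem_ite_nil_right, List.mem_singleton] at hx hy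
    obtain ⟨ip1, _, _, hx⟩ := hx
    obtain ⟨ip2, _, _, hy⟩ := hy
    subst hx; subst hy
    left
    simpa [candOf] using hpq

-- bestOf is the betterB-maximum
theorem bestOf_none_iff (L : List (Int × Int × Int)) : bestOf L = none ↔ L = [] := by
  cases L <;> simp [bestOf]

theorem foldl_maxB_spec (s : Int × Int × Int) (L : List (Int × Int × Int)) :
    (L.foldl maxB s = s ∨ L.foldl maxB s ∈ L) ∧
    betterB s (L.foldl maxB s) = false ∧ ∀ v ∈ L, betterB v (L.foldl maxB s) = false := by
  induction L generalizing s with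
  | nil => simp [betterB_irrefl]
  | cons v L ih =>
    simp only [List.foldl_cons]
    obtain ⟨hmem, hself, hdom⟩ := ih (maxB s v)
    have hsv : betterB s (maxB s v) = false ∧ betterB v (maxB s v) = false := by
      by_cases h : betterB v s = true
      · simp only [maxB, h, if_pos]
        exact ⟨betterB_asymm h, betterB_irrefl v⟩
      · simp only [Bool.not_eq_true] at h
        simp only [maxB, h]
        simp only [Bool.false_eq_true, if_neg, not_false_iff]
        exact ⟨betterB_irrefl s, h⟩
    refine ⟨?_, ?_, ?_⟩
    · rcases hmem with h | h
      · rw [h]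
        by_cases hb : betterB v s = true
        · right; simp [maxB, hb]
        · left; simp [maxB, hb]
      · right; exact List.mem_cons_of_mem _ h
    · exact betterB_le_trans hsv.1 hself
    · intro w hw
      rcases List.mem_cons.mp hw with h | h
      · subst h; exact betterB_le_trans hsv.2 hself
      · exact hdom w h

theorem bestOf_spec {L : List (Int × Int × Int)} {b : Int × Int × Int} (h : bestOf L = some b) :
    b ∈ L ∧ ∀ v ∈ L, betterB v b = false := by
  cases L with
  | nil => simp [bestOf] at h
  | cons v L =>
    simp only [bestOf, Option.some.injEq] at h
    subst h
    obtain ⟨hmem, hself, hdom⟩ := foldl_maxB_spec v L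
    constructor
    · rcases hmem with h | h
      · rw [h]; simp
      · exact List.mem_cons_of_mem _ h
    · intro w hw
      rcases List.mem_cons.mp hw with h | h
      · subst h; exact hself
      · exact hdom w h

theorem bestOf_unique {L : List (Int × Int × Int)} {b : Int × Int × Int}
    (hmem : b ∈ L) (hdom : ∀ v ∈ L, betterB v b = false) : bestOf L = some b := by
  cases L with
  | nil => simp at hmem
  | cons v L =>
    obtain ⟨hmem', hdom'⟩ := bestOf_spec (L := v :: L) (b := L.foldl maxB v) rfl
    have h1 : betterB b (L.foldl maxB v) = false := hdom' b hmem
    have h2 : betterB (L.foldl maxB v) b = false := hdom _ hmem'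
    simp only [bestOf, Option.some.injEq]
    exact (betterB_total h1 h2).symm

-- A computed from bestOf of the filtered candidate list
theorem A_eq_bestOf (target : String) (pats : List String) (a f : Int) :
    check_continiously target pats a f =
      match bestOf ((candsA target.toList pats a f).filter (fun v => decide (f < v.1))) with
      | none => (false, none)
      | some r => (true, some (r.2.1, r.2.2 + 1)) := by
  have hfold : (PySem.List.pyRange (a + 1) (f + 2) 1).foldl
      (fun (st : Int × Int × Int) pos =>
        (PySem.List.enumerate pats 0).foldl
          (fun (st : Int × Int × Int) ip =>
            if pyStartswithFrom target.toList ip.2.toList pos then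
              if st.1 < PySem.Str.len ip.2 + pos - 1 then
                (PySem.Str.len ip.2 + pos - 1, ip.1 + 1, pos)
              else st
            else st) st) ((f, -1, -1) : Int × Int × Int) =
      (candsA target.toList pats a f).foldl stepA (f, -1, -1) := by
    unfold candsA
    rw [foldl_flatMap']
    congr 1
    funext st pos
    rw [foldl_flatMap']
    congr 1
    funext s ip
    by_cases h : pyStartswithFrom target.toList ip.2.toList pos <;>
      simp [h, stepA, candOf]
  simp only [check_continiously, hfold]
  rw [foldl_stepA_filter]
  have hpred : (fun v : Int × Int × Int => decide (((f, -1, -1) : Int × Int × Int).1 < v.1)) =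
      fun v : Int × Int × Int => decide (f < v.1) := rfl
  rw [hpred]
  rcases hW : (candsA target.toList pats a f).filter (fun v => decide (f < v.1)) with _ | ⟨v, W'⟩
  · rw [hW]; simp [bestOf]
  · rw [hW]
    have hvW : v ∈ (candsA target.toList pats a f).filter (fun v => decide (f < v.1)) := by
      rw [hW]; simp
    have hv1 : f < v.1 := by
      have := (List.mem_filter.mp hvW).2
      simpa using this
    have hstep : stepA (f, -1, -1) v = v := by
      simp only [stepA]; split <;> [rfl; omega]
    have hpwW := (candsA_pairwise target.toList pats a f).filter
      (fun v => decide (f < v.1))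
    rw [hW] at hpwW
    rcases List.pairwise_cons.mp hpwW with ⟨hhead, htail⟩
    simp only [List.foldl_cons, hstep]
    rw [foldl_stepA_eq_maxB v W'
      (htail.imp (fun h => fun _ => h))
      (fun w hw _ => hhead w hw)]
    have hne : (W'.foldl maxB v).1 ≠ f := by
      have := (foldl_maxB_spec v W').2.1
      have := not_betterB_fst this
      omega
    simp only [bestOf, if_neg hne]

theorem tupGt_phi (u v : Int × Int × Int) : tupGt (phi u) (phi v) = betterB u v := by
  rw [Bool.eq_iff_iff]
  simp [tupGt, phi, betterB]

-- B computed from bestOf of its per-pattern candidates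
theorem B_eq_bestOf (target : String) (pats : List String) (a f : Int) :
    check_continiously_alt target pats a f =
      match bestOf (candsP target.toList pats a f) with
      | none => (false, none)
      | some r => if r.1 ≤ f then (false, none) else (true, some (r.2.1, r.2.2 + 1)) := by
  have hfold : ∀ (l : List (Int × String)) (o : Option (Int × Int × Int)),
      l.foldl (fun (best : Option (Int × Int × Int)) rp =>
        match (PySem.List.pyRange (f + 1) a (-1)).find?
            (fun pos => pyStartswithFrom target.toList rp.2.toList pos) with
        | none => best
        | some pos =>
          let cand : Int × Int × Int := (pos + PySem.Str.len rp.2 - 1, -pos, -rp.1)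
          match best with
          | none => some cand
          | some b => if tupGt cand b then some cand else best) (Option.map phi o) =
      Option.map phi (match o with
        | none => bestOf (l.flatMap (pcand target.toList a f))
        | some s => some ((l.flatMap (pcand target.toList a f)).foldl maxB s)) := by
    intro l
    induction l with
    | nil => intro o; cases o <;> rfl
    | cons rp l ih =>
      intro o
      rcases hf : (PySem.List.pyRange (f + 1) a (-1)).find?
          (fun pos => pyStartswithFrom target.toList rp.2.toList pos) with _ | pos
      · have hpc : pcand target.toList a f rp = [] := by simp [pcand, hf]
        simp only [List.foldl_cons, List.flatMap_cons, hf, hpc, List.nil_append]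
        exact ih o
      · have hpc : pcand target.toList a f rp =
            [(pos + PySem.Str.len rp.2 - 1, rp.1, pos)] := by simp [pcand, hf]
        set c : Int × Int × Int := (pos + PySem.Str.len rp.2 - 1, rp.1, pos) with hc
        have hphic : (pos + PySem.Str.len rp.2 - 1, -pos, -rp.1) = phi c := by
          simp [phi, hc]
        cases o with
        | none =>
          simp only [List.foldl_cons, List.flatMap_cons, hf, hpc, Option.map_none,
            List.singleton_append]
          rw [hphic, ← Option.map_some, ih (some c)]
          simp [bestOf]
        | some s =>
          simp only [List.foldl_cons, List.flatMap_cons, hf, hpc, Option.map_some,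
            List.singleton_append]
          rw [hphic, tupGt_phi]
          have hmax : (if betterB c s = true then some (phi c) else some (phi s)) =
              some (phi (maxB s c)) := by
            simp only [maxB]; by_cases h : betterB c s = true <;> simp [h]
          rw [hmax, ← Option.map_some, ih (some (maxB s c))]
          simp
  simp only [check_continiously_alt]
  have hmain := hfold (PySem.List.enumerate pats 1) none
  simp only [Option.map_none] at hmain
  rw [hmain]
  simp only [candsP]
  rcases hb : bestOf ((PySem.List.enumerate pats 1).flatMap (pcand target.toList a f)) with _ | r
  · rfl
  · simp [phi]

-- membership characterisations and the domination bridge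
theorem mem_candsA {t : List Char} {pats : List String} {a f : Int} {v : Int × Int × Int} :
    v ∈ candsA t pats a f ↔ ∃ pos : Int, (a + 1 ≤ pos ∧ pos < f + 2) ∧
      ∃ ip ∈ PySem.List.enumerate pats 0,
        pyStartswithFrom t ip.2.toList pos = true ∧ v = candOf pos ip := by
  unfold candsA
  simp only [List.mem_flatMap, List.mem_ite_nil_right, List.mem_singleton,
    PySem.List.mem_pyRange_one]

theorem candsP_subset {t : List Char} {pats : List String} {a f : Int} {c : Int × Int × Int}
    (h : c ∈ candsP t pats a f) : c ∈ candsA t pats a f := by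
  simp only [candsP, List.mem_flatMap] at h
  obtain ⟨rp, hrp, hc⟩ := h
  rcases hf : (PySem.List.pyRange (f + 1) a (-1)).find?
      (fun pos => pyStartswithFrom t rp.2.toList pos) with _ | pos
  · simp [pcand, hf] at hc
  · simp only [pcand, hf, List.mem_singleton] at hc
    subst hc
    have hposmem := List.mem_of_find?_eq_some hf
    rw [PySem.List.mem_pyRange_neg_one] at hposmem
    have hpred := List.find?_some hf
    rw [PySem.List.mem_enumerate_iff] at hrp
    obtain ⟨k, hk, hrpe⟩ := hrp
    rw [mem_candsA]
    refine ⟨pos, ⟨by omega, by omega⟩, ((0 : Int) + k, pats[k]), ?_, ?_, ?_⟩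
    · rw [PySem.List.mem_enumerate_iff]; exact ⟨k, hk, rfl⟩
    · subst hrpe; simpa using hpred
    · subst hrpe
      simp only [candOf, Prod.ext_iff]
      refine ⟨by omega, by omega, trivial⟩

theorem candsA_dominated {t : List Char} {pats : List String} {a f : Int} {v : Int × Int × Int}
    (h : v ∈ candsA t pats a f) : ∃ c ∈ candsP t pats a f, betterB v c = false := by
  rw [mem_candsA] at h
  obtain ⟨pos0, ⟨hl, hr⟩, ip, hip, hm, hv⟩ := h
  rw [PySem.List.mem_enumerate_iff] at hip
  obtain ⟨k, hk, hipe⟩ := hip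
  subst hipe; subst hv
  have hrp : ((1 : Int) + k, pats[k]) ∈ PySem.List.enumerate pats 1 :=
    (PySem.List.mem_enumerate_iff _ _ _).mpr ⟨k, hk, rfl⟩
  have hmem0 : pos0 ∈ PySem.List.pyRange (f + 1) a (-1) :=
    (PySem.List.mem_pyRange_neg_one).mpr ⟨by omega, by omega⟩
  have hm' : pyStartswithFrom t (((1 : Int) + k, pats[k]) : Int × String).2.toList pos0 = true := by
    simpa using hm
  have hsome : ((PySem.List.pyRange (f + 1) a (-1)).find?
      (fun pos => pyStartswithFrom t (((1 : Int) + k, pats[k]) : Int × String).2.toList pos)).isSome :=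
    List.find?_isSome.mpr ⟨pos0, hmem0, hm'⟩
  obtain ⟨pos1, hf1⟩ := Option.isSome_iff_exists.mp hsome
  refine ⟨(pos1 + PySem.Str.len pats[k] - 1, (1 : Int) + k, pos1), ?_, ?_⟩
  · simp only [candsP, List.mem_flatMap]
    exact ⟨((1 : Int) + k, pats[k]), hrp, by simp [pcand, hf1]⟩
  · have hle : pos0 ≤ pos1 := by
      have hpw : (PySem.List.pyRange (f + 1) a (-1)).Pairwise (fun x y => y < x) := by
        rw [PySem.List.pyRange_neg_one_eq_reverse, List.pairwise_reverse]
        exact PySem.List.pairwise_lt_pyRange_one _ _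
      obtain ⟨hp1, as, bs, heq, hnot⟩ := List.find?_eq_some_iff_append.mp hf1
      rw [heq] at hmem0 hpw
      rcases List.mem_append.mp hmem0 with hin | hin
      · have := hnot _ hin
        rw [hm'] at this
        simp at this
      · rcases List.mem_cons.mp hin with heq0 | hin
        · omega
        · have := (List.pairwise_append.mp hpw).2.1
          have := (List.pairwise_cons.mp this).1 _ hin
          omega
    simp only [betterB, candOf]
    simp only [Bool.or_eq_false_iff, Bool.and_eq_false_iff]
    simp only [decide_eq_false_iff_not, beq_eq_false_iff_ne, ne_eq]
    omega

theorem bestOf_candsP_eq (t : List Char) (pats : List String) (a f : Int) :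
    bestOf (candsP t pats a f) = bestOf (candsA t pats a f) := by
  rcases ha : bestOf (candsA t pats a f) with _ | b
  · rw [bestOf_none_iff] at ha
    have hP : candsP t pats a f = [] := by
      rw [List.eq_nil_iff_forall_not_mem]
      intro c hc
      have := candsP_subset hc
      rw [ha] at this
      simp at this
    rw [hP]
    rfl
  · obtain ⟨hbmem, hbdom⟩ := bestOf_spec ha
    obtain ⟨c, hcP, hbc⟩ := candsA_dominated hbmem
    have hcb : betterB c b = false := hbdom c (candsP_subset hcP)
    have hbceq : b = c := betterB_total hbc hcb
    apply bestOf_unique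
    · rw [hbceq]; exact hcP
    · intro w hw
      exact hbdom w (candsP_subset hw)

-- ===== VERDICT (by name: the statement is the Claim_ definition above) =====
theorem check_continiously_spec : Claim_equal_check_continiously := by
  intro target patterns prev_start prev_fin _
  unfold Spec_check_continiously
  rw [A_eq_bestOf, B_eq_bestOf, bestOf_candsP_eq]
  rcases hb : bestOf (candsA target.toList patterns prev_start prev_fin) with _ | r
  · rw [bestOf_none_iff] at hb
    rw [hb]
    simp [bestOf]
  · obtain ⟨hmem, hdom⟩ := bestOf_spec hb
    by_cases hr : r.1 ≤ prev_fin
    · have hWnil : (candsA target.toList patterns prev_start prev_fin).filter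
          (fun v => decide (prev_fin < v.1)) = [] := by
        rw [List.eq_nil_iff_forall_not_mem]
        intro v hv
        obtain ⟨hvA, hvgt⟩ := List.mem_filter.mp hv
        have := not_betterB_fst (hdom v hvA)
        simp only [decide_eq_true_eq] at hvgt
        omega
      rw [hWnil]
      simp [bestOf, hr]
    · have hbest : bestOf ((candsA target.toList patterns prev_start prev_fin).filter
          (fun v => decide (prev_fin < v.1))) = some r := by
        apply bestOf_unique
        · exact List.mem_filter.mpr ⟨hmem, by simp only [decide_eq_true_eq]; omega⟩
        · intro v hv
          exact hdom v (List.mem_filter.mp hv).1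
      rw [hbest]
      simp [hr]
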